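-- pv_equiv track=rewrite | github.com/tomiyee/tetris-python | models/tombot/main.py | has_holes
-- ===== SOURCE A (Python) =====
-- def has_holes(board):
--     """Returns true if there are no gaps in a column"""
--     # dimensions of the board
--     rows = len(board)
--     cols = len(board[0])
--
--     for c in range(cols):
--         col = [board[r][c] for r in range(rows)][::-1]
--         s = 0
--         for i in range(rows):
--             if col[i] == 0:
--                 s = 1
--             if col[i] == 1 and s == 1:
--                 return True
--     return False
-- ===== SOURCE B (Python) =====
-- def has_holes(board):
--     """Returns true if there are no gaps in a column"""
--     cols = len(board[0])
--     seen = [False] * cols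
--     for row in board:
--         for c in range(cols):
--             if row[c] == 1:
--                 seen[c] = True
--             elif row[c] == 0 and seen[c]:
--                 return True
--     return False
-- ===== Notes on version B (the rewrite author's own statement) =====
-- stated objective: alternative
-- what changed: A sweeps each column bottom-up with a 'seen an empty cell' flag (column-major, builds and reverses each column); B makes a single row-major top-down pass over the board maintaining a per-column 'seen a filled cell' vector and reports a hole the moment an empty cell appears under a marked column.
-- outside the precondition, e.g. on has_holes([[1, 8], [-1], [0, 2]]): A returns True, B raises IndexError; on has_holes([[1, 0], [0]]): A returns True, B returns True
import Mathlib
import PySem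

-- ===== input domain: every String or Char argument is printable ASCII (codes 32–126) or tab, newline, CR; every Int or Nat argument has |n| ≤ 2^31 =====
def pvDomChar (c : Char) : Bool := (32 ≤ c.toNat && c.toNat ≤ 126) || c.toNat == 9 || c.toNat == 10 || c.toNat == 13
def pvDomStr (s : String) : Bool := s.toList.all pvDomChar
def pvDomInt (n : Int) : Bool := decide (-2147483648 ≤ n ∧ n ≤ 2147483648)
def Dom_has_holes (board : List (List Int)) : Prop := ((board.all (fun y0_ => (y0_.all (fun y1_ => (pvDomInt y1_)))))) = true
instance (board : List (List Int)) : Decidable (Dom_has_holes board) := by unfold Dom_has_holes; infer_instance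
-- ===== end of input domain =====

-- B replaces A's column-major bottom-up sweeps by a single row-major top-down pass with a per-column 'seen a filled cell' vector (alternative decomposition, same cost).

-- ===== PORT A =====
-- column c of the board, bottom row first: [board[r][c] for r in range(rows)][::-1]
-- (pyGetD defaults are never hit inside Pre_has_holes, where every access is in range)
def pvColA (board : List (List Int)) (rows : Nat) (c : Int) : List Int :=
  ((List.range rows).map (fun (r : Nat) => PySem.List.pyGetD (PySem.List.pyGetD board (r : Int) []) c 0)).reverse

-- the inner 'for i in range(rows)' loop with its flag s
def pvScanA : List Int → Int → Bool
  | [], _ => false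
  | x :: xs, s =>
      let s' := if x = 0 then 1 else s
      if x = 1 ∧ s' = 1 then true else pvScanA xs s'

-- the outer 'for c in range(cols)' loop with its early return
def pvLoopA (board : List (List Int)) (rows : Nat) : List Int → Bool
  | [] => false
  | c :: cs => if pvScanA (pvColA board rows c) 0 then true else pvLoopA board rows cs

def has_holes (board : List (List Int)) : Bool :=
  let rows := board.length
  let cols := (PySem.List.pyGetD board (0 : Int) []).length
  pvLoopA board rows (PySem.List.pyRange 0 (cols : Int) 1)

-- ===== PORT B =====
-- the inner 'for c in range(cols)' loop over one row: none = the early 'return True',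
-- some seen' = the updated seen vector (c is a Nat since range(cols) is nonnegative;
-- all accesses to row and seen are in range inside Pre_has_holes, pyGetD/getD are exact there)
def pvRowB (row : List Int) : List Nat → List Bool → Option (List Bool)
  | [], seen => some seen
  | c :: cs, seen =>
      if PySem.List.pyGetD row (c : Int) 0 = 1 then pvRowB row cs (seen.set c true)
      else if PySem.List.pyGetD row (c : Int) 0 = 0 ∧ seen.getD c false = true then none
      else pvRowB row cs seen

-- the outer 'for row in board' loop
def pvRowsB (cols : Nat) : List (List Int) → List Bool → Bool
  | [], _ => false
  | row :: rest, seen =>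
      match pvRowB row (List.range cols) seen with
      | none => true
      | some seen' => pvRowsB cols rest seen'

def has_holes_alt (board : List (List Int)) : Bool :=
  let cols := (PySem.List.pyGetD board (0 : Int) []).length
  pvRowsB cols board (List.replicate cols false)

-- ===== PRECONDITION & SPEC =====
-- Python A raises IndexError on the empty board (board[0]) and when a row is shorter than the
-- first row and the scan reaches that column.  This Pre_ slightly narrows the latter: it also
-- excludes ragged boards on which A happens to return early (a hole in a column it scans before
-- reaching the short row) — there B's row-major pass hits the short row first and raises, or
-- returns the same value as A (see claim cites).
def Pre_has_holes (board : List (List Int)) : Prop :=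
  board ≠ [] ∧ ∀ row ∈ board, (board.headD []).length ≤ row.length
instance (board : List (List Int)) : Decidable (Pre_has_holes board) := by unfold Pre_has_holes; infer_instance

def pvWitness_has_holes : List (List Int) := [[1], [0]]

def Spec_has_holes (board : List (List Int)) (out : Bool) : Prop := out = has_holes_alt board
instance (board : List (List Int)) (out : Bool) : Decidable (Spec_has_holes board out) := by unfold Spec_has_holes; infer_instance

-- ===== CLAIM (what is proved, stated in full; the proofs are below) =====
def Claim_equal_has_holes : Prop := ∀ (board : List (List Int)), Dom_has_holes board → Pre_has_holes board → Spec_has_holes board (has_holes board)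

-- ===== LEMMAS AND PROOFS =====

-- cell (r, c) of the board, totalised the way both ports totalise it
def pvCell (board : List (List Int)) (r c : Nat) : Int :=
  PySem.List.pyGetD (PySem.List.pyGetD board (r : Int) []) (c : Int) 0

-- the common characterisation both sides are reduced to:
-- a filled cell with an empty cell strictly below it in some column c < cols
def pvHole (board : List (List Int)) (cols : Nat) : Prop :=
  ∃ c < cols, ∃ i j : Nat, i < j ∧ j < board.length ∧ pvCell board i c = 1 ∧ pvCell board j c = 0

----- A side -----

theorem pvScanA_one (l : List Int) : pvScanA l 1 = true ↔ (1 : Int) ∈ l := by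
  induction l with
  | nil => simp [pvScanA]
  | cons x xs ih =>
      by_cases hx1 : x = (1 : Int)
      · subst hx1; simp [pvScanA]
      · by_cases hx0 : x = (0 : Int)
        · subst hx0; simp [pvScanA, ih]
        · have h : pvScanA (x :: xs) 1 = pvScanA xs 1 := by
            simp [pvScanA, hx0, hx1]
          rw [h, ih]
          simp only [List.mem_cons]
          exact ⟨Or.inr, fun h => h.elim (fun h1 => absurd h1.symm hx1) id⟩

theorem pvScanA_zero (l : List Int) :
    pvScanA l 0 = true ↔ ∃ u w, l = u ++ (0 : Int) :: w ∧ (1 : Int) ∈ w := by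
  induction l with
  | nil => simp [pvScanA]
  | cons x xs ih =>
      by_cases hx0 : x = (0 : Int)
      · subst hx0
        have h : pvScanA ((0 : Int) :: xs) 0 = pvScanA xs 1 := by
          simp [pvScanA]
        rw [h, pvScanA_one]
        constructor
        · intro h1; exact ⟨[], xs, by simp, h1⟩
        · rintro ⟨u, w, he, h1⟩
          cases u with
          | nil =>
              simp only [List.nil_append, List.cons.injEq] at he
              rw [he.2]; exact h1
          | cons y u' =>
              simp only [List.cons_append, List.cons.injEq] at he
              rw [he.2]; simp [h1]
      · have h : pvScanA (x :: xs) 0 = pvScanA xs 0 := by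
          simp [pvScanA, hx0]
        rw [h, ih]
        constructor
        · rintro ⟨u, w, he, h1⟩; exact ⟨x :: u, w, by rw [he]; rfl, h1⟩
        · rintro ⟨u, w, he, h1⟩
          cases u with
          | nil => simp only [List.nil_append, List.cons.injEq] at he; exact absurd he.1 hx0
          | cons y u' =>
              simp only [List.cons_append, List.cons.injEq] at he
              exact ⟨u', w, he.2, h1⟩

-- decomposition transfers through reversal, swapping the two marked values
theorem rev_decomp_mp (l : List Int) (a b : Int)
    (h : ∃ u w, l = u ++ a :: w ∧ b ∈ w) :
    ∃ u w, l.reverse = u ++ b :: w ∧ a ∈ w := by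
  obtain ⟨u, w, he, hb⟩ := h
  obtain ⟨p, q, hw⟩ := List.append_of_mem hb
  refine ⟨q.reverse, p.reverse ++ a :: u.reverse, ?_, by simp⟩
  rw [he, hw]
  simp [List.reverse_append, List.append_assoc]

theorem rev_decomp (l : List Int) (a b : Int) :
    (∃ u w, l = u ++ a :: w ∧ b ∈ w) ↔ (∃ u w, l.reverse = u ++ b :: w ∧ a ∈ w) := by
  constructor
  · exact rev_decomp_mp l a b
  · intro h
    have := rev_decomp_mp l.reverse b a h
    simpa using this

-- a decomposition of a map-over-range is a pair of indices
theorem decomp_map_range (f : Nat → Int) (n : Nat) (a b : Int) :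
    (∃ u w, (List.range n).map f = u ++ a :: w ∧ b ∈ w) ↔
      ∃ i j : Nat, i < j ∧ j < n ∧ f i = a ∧ f j = b := by
  constructor
  · rintro ⟨u, w, he, hb⟩
    obtain ⟨p, q, hw⟩ := List.append_of_mem hb
    rw [hw] at he
    have hlen : u.length + 1 + (p.length + 1) ≤ n := by
      have := congrArg List.length he
      simp at this; omega
    refine ⟨u.length, u.length + 1 + p.length, by omega, by omega, ?_, ?_⟩
    · have h1 : ((List.range n).map f)[u.length]? = some a := by
        rw [he, List.getElem?_append_right (le_refl u.length)]
        simp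
      rw [List.getElem?_map, List.getElem?_range (by omega)] at h1
      simpa using h1
    · have h2 : ((List.range n).map f)[u.length + 1 + p.length]? = some b := by
        have hre : u ++ a :: (p ++ b :: q) = (u ++ a :: p) ++ b :: q := by simp
        have hl : (u ++ a :: p).length = u.length + 1 + p.length := by simp; omega
        rw [he, hre, ← hl, List.getElem?_append_right (le_refl _)]
        simp
      rw [List.getElem?_map, List.getElem?_range (by omega)] at h2
      simpa using h2
  · rintro ⟨i, j, hij, hjn, hfi, hfj⟩
    set l := (List.range n).map f with hl
    have hlen : l.length = n := by simp [hl]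
    have hi : i < l.length := by omega
    have hj : j < l.length := by omega
    have hgi : l[i] = f i := by simp [hl]
    have hgj : l[j] = f j := by simp [hl]
    refine ⟨l.take i, l.drop (i + 1), ?_, ?_⟩
    · conv_lhs => rw [← List.take_append_drop i l]
      rw [List.drop_eq_getElem_cons hi, hgi, hfi]
    · rw [← hfj, ← hgj]
      have hd : l[j] = (l.drop (i + 1))[j - (i + 1)]'(by simp; omega) := by
        rw [List.getElem_drop]; congr 1; omega
      rw [hd]; exact List.getElem_mem _

theorem loopA_any (board : List (List Int)) (rows : Nat) (cs : List Int) :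
    pvLoopA board rows cs = true ↔ ∃ c ∈ cs, pvScanA (pvColA board rows c) 0 = true := by
  induction cs with
  | nil => simp [pvLoopA]
  | cons c cs ih =>
      by_cases h : pvScanA (pvColA board rows c) 0 = true
      · simp [pvLoopA, h]
      · simp only [pvLoopA, if_neg h, ih, List.mem_cons]
        constructor
        · rintro ⟨c', hm, hs⟩; exact ⟨c', Or.inr hm, hs⟩
        · rintro ⟨c', hm, hs⟩
          rcases hm with rfl | hm
          · exact absurd hs h
          · exact ⟨c', hm, hs⟩

theorem hasA_iff (board : List (List Int)) :
    has_holes board = true ↔ pvHole board (PySem.List.pyGetD board (0 : Int) []).length := by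
  unfold has_holes pvHole
  rw [loopA_any]
  constructor
  · rintro ⟨c, hc, hs⟩
    rw [PySem.List.mem_pyRange_one] at hc
    obtain ⟨hc0, hcn⟩ := hc
    refine ⟨c.toNat, by omega, ?_⟩
    have hcc : ((c.toNat : Nat) : Int) = c := by omega
    unfold pvColA at hs
    rw [pvScanA_zero] at hs
    have h2 := (rev_decomp ((List.range board.length).map
      (fun (r : Nat) => PySem.List.pyGetD (PySem.List.pyGetD board (r : Int) []) c 0)) 1 0).mpr hs
    rw [decomp_map_range] at h2
    obtain ⟨i, j, hij, hjn, h1, h0⟩ := h2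
    exact ⟨i, j, hij, hjn, by simpa [pvCell, hcc] using h1, by simpa [pvCell, hcc] using h0⟩
  · rintro ⟨c, hc, i, j, hij, hjn, h1, h0⟩
    refine ⟨(c : Int), by rw [PySem.List.mem_pyRange_one]; omega, ?_⟩
    unfold pvColA
    rw [pvScanA_zero]
    apply rev_decomp_mp
    rw [decomp_map_range]
    exact ⟨i, j, hij, hjn, h1, h0⟩

----- B side -----

theorem getD_set_ne (seen : List Bool) (c c' : Nat) (h : c' ≠ c) :
    (seen.set c true).getD c' false = seen.getD c' false := by
  simp [List.getD, List.getElem?_set_ne (Ne.symm h)]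

theorem getD_set_self (seen : List Bool) (c : Nat) (h : c < seen.length) :
    (seen.set c true).getD c false = true := by
  simp [List.getD, h]

theorem rowB_none_iff (row : List Int) (cs : List Nat) (seen : List Bool) :
    pvRowB row cs seen = none ↔
      ∃ c ∈ cs, PySem.List.pyGetD row (c : Int) 0 = 0 ∧ seen.getD c false = true := by
  induction cs generalizing seen with
  | nil => simp [pvRowB]
  | cons c cs ih =>
      by_cases h1 : PySem.List.pyGetD row (c : Int) 0 = 1
      · rw [show pvRowB row (c :: cs) seen = pvRowB row cs (seen.set c true) by
          simp only [pvRowB]; rw [if_pos h1]]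
        rw [ih]
        constructor
        · rintro ⟨c', hm, h0, hs⟩
          have hne : c' ≠ c := by rintro rfl; rw [h0] at h1; exact absurd h1 (by norm_num)
          exact ⟨c', List.mem_cons_of_mem _ hm, h0, by rwa [getD_set_ne _ _ _ hne] at hs⟩
        · rintro ⟨c', hm, h0, hs⟩
          have hne : c' ≠ c := by rintro rfl; rw [h0] at h1; exact absurd h1 (by norm_num)
          rcases List.mem_cons.mp hm with rfl | hm
          · exact absurd rfl hne
          · exact ⟨c', hm, h0, by rwa [getD_set_ne _ _ _ hne]⟩
      · by_cases h2 : PySem.List.pyGetD row (c : Int) 0 = 0 ∧ seen.getD c false = true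
        · rw [show pvRowB row (c :: cs) seen = none by simp only [pvRowB]; rw [if_neg h1, if_pos h2]]
          simp only [true_iff]
          exact ⟨c, List.mem_cons_self .., h2.1, h2.2⟩
        · rw [show pvRowB row (c :: cs) seen = pvRowB row cs seen by simp only [pvRowB]; rw [if_neg h1, if_neg h2]]
          rw [ih]
          constructor
          · rintro ⟨c', hm, h0, hs⟩; exact ⟨c', List.mem_cons_of_mem _ hm, h0, hs⟩
          · rintro ⟨c', hm, h0, hs⟩
            rcases List.mem_cons.mp hm with rfl | hm
            · exact absurd ⟨h0, hs⟩ h2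
            · exact ⟨c', hm, h0, hs⟩

theorem rowB_some (row : List Int) (cs : List Nat) (seen seen' : List Bool)
    (hlen : ∀ c ∈ cs, c < seen.length)
    (h : pvRowB row cs seen = some seen') :
    seen'.length = seen.length ∧ ∀ c : Nat,
      seen'.getD c false =
        (seen.getD c false || (decide (c ∈ cs) && decide (PySem.List.pyGetD row (c : Int) 0 = 1))) := by
  induction cs generalizing seen with
  | nil =>
      simp [pvRowB] at h
      subst h
      exact ⟨rfl, fun c => by simp⟩
  | cons c0 cs ih =>
      by_cases h1 : PySem.List.pyGetD row (c0 : Int) 0 = 1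
      · rw [show pvRowB row (c0 :: cs) seen = pvRowB row cs (seen.set c0 true) by
          simp only [pvRowB]; rw [if_pos h1]] at h
        have hlen' : ∀ c ∈ cs, c < (seen.set c0 true).length := by
          simpa using fun c hm => hlen c (List.mem_cons_of_mem _ hm)
        obtain ⟨hL, hG⟩ := ih (seen.set c0 true) hlen' h
        refine ⟨by simpa using hL, fun c => ?_⟩
        rw [hG c]
        by_cases hc : c = c0
        · subst hc
          rw [getD_set_self _ _ (hlen c (List.mem_cons_self ..))]
          simp [h1]
        · rw [getD_set_ne _ _ _ hc]
          simp [List.mem_cons, hc]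
      · by_cases h2 : PySem.List.pyGetD row (c0 : Int) 0 = 0 ∧ seen.getD c0 false = true
        · rw [show pvRowB row (c0 :: cs) seen = none by simp only [pvRowB]; rw [if_neg h1, if_pos h2]] at h
          exact absurd h (by simp)
        · rw [show pvRowB row (c0 :: cs) seen = pvRowB row cs seen by simp only [pvRowB]; rw [if_neg h1, if_neg h2]] at h
          obtain ⟨hL, hG⟩ := ih seen (fun c hm => hlen c (List.mem_cons_of_mem _ hm)) h
          refine ⟨hL, fun c => ?_⟩
          rw [hG c]
          by_cases hc : c = c0
          · subst hc; rw [decide_eq_false h1]; simp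
          · simp [List.mem_cons, hc]

-- characterisation of the outer row loop
theorem rowsB_iff (cols : Nat) (rs : List (List Int)) (seen : List Bool)
    (hlen : seen.length = cols) :
    pvRowsB cols rs seen = true ↔
      ∃ j < rs.length, ∃ c < cols,
        PySem.List.pyGetD (PySem.List.pyGetD rs (j : Int) []) (c : Int) 0 = 0 ∧
          (seen.getD c false = true ∨
            ∃ i < j, PySem.List.pyGetD (PySem.List.pyGetD rs (i : Int) []) (c : Int) 0 = 1) := by
  induction rs generalizing seen with
  | nil => simp [pvRowsB]
  | cons row rest ih =>
      have hshift : ∀ (k : Nat), PySem.List.pyGetD (row :: rest) ((k + 1 : Nat) : Int) [] =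
          PySem.List.pyGetD rest (k : Int) [] := by
        intro k
        rw [PySem.List.pyGetD_natCast, PySem.List.pyGetD_natCast]
        simp
      have hzero : PySem.List.pyGetD (row :: rest) ((0 : Nat) : Int) [] = row := by
        simp
      rcases hm : pvRowB row (List.range cols) seen with _ | seen'
      · -- inner loop returned True
        rw [show pvRowsB cols (row :: rest) seen = true by simp [pvRowsB, hm]]
        simp only [true_iff]
        obtain ⟨c, hmc, h0, hs⟩ := (rowB_none_iff row (List.range cols) seen).mp hm
        exact ⟨0, by simp, c, List.mem_range.mp hmc, by rw [hzero]; exact h0, Or.inl hs⟩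
      · rw [show pvRowsB cols (row :: rest) seen = pvRowsB cols rest seen' by simp [pvRowsB, hm]]
        obtain ⟨hL, hG⟩ := rowB_some row (List.range cols) seen seen'
          (fun c hc => by rw [hlen]; exact List.mem_range.mp hc) hm
        rw [ih seen' (hL.trans hlen)]
        constructor
        · rintro ⟨j, hj, c, hc, h0, hrest⟩
          refine ⟨j + 1, by simpa using Nat.succ_lt_succ hj, c, hc, by rw [hshift]; exact h0, ?_⟩
          rcases hrest with hs | ⟨i, hij, h1⟩
          · rw [hG c] at hs
            rcases Bool.or_eq_true_iff.mp hs with hs | hs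
            · exact Or.inl hs
            · have := And.intro (List.mem_range.mp (of_decide_eq_true (Bool.and_eq_true_iff.mp hs).1))
                (of_decide_eq_true (Bool.and_eq_true_iff.mp hs).2)
              exact Or.inr ⟨0, by omega, by rw [hzero]; exact this.2⟩
          · exact Or.inr ⟨i + 1, by omega, by rw [hshift]; exact h1⟩
        · rintro ⟨j, hj, c, hc, h0, hrest⟩
          cases j with
          | zero =>
              rw [hzero] at h0
              rcases hrest with hs | ⟨i, hi, _⟩
              · -- would have made the inner loop return none
                exact absurd ((rowB_none_iff row (List.range cols) seen).mpr
                  ⟨c, List.mem_range.mpr hc, h0, hs⟩) (by simp [hm])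
              · omega
          | succ j' =>
              rw [hshift] at h0
              refine ⟨j', by simpa using Nat.lt_of_succ_lt_succ hj, c, hc, h0, ?_⟩
              rcases hrest with hs | ⟨i, hij, h1⟩
              · exact Or.inl (by rw [hG c, hs]; simp)
              · cases i with
                | zero =>
                    rw [hzero] at h1
                    exact Or.inl (by rw [hG c, h1]; simp [List.mem_range, hc])
                | succ i' =>
                    rw [hshift] at h1
                    exact Or.inr ⟨i', by omega, h1⟩

theorem hasB_iff (board : List (List Int)) :
    has_holes_alt board = true ↔ pvHole board (PySem.List.pyGetD board (0 : Int) []).length := by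
  unfold has_holes_alt pvHole
  rw [rowsB_iff _ _ _ (List.length_replicate ..)]
  constructor
  · rintro ⟨j, hj, c, hc, h0, hrest⟩
    rcases hrest with hs | ⟨i, hij, h1⟩
    · simp [List.getD] at hs
    · exact ⟨c, hc, i, j, hij, hj, h1, h0⟩
  · rintro ⟨c, hc, i, j, hij, hj, h1, h0⟩
    exact ⟨j, hj, c, hc, h0, Or.inr ⟨i, hij, h1⟩⟩

-- ===== VERDICT (by name: the statement is the Claim_ definition above) =====
theorem has_holes_spec : Claim_equal_has_holes := by
  intro board _ _
  unfold Spec_has_holes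
  rw [Bool.eq_iff_iff, hasB_iff, hasA_iff]
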